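-- pv_equiv track=rewrite | github.com/tardis-key/siiRL | siirl/workers/dag_worker/mixins/utilities_mixin.py | format_metrics_by_group
-- ===== SOURCE A (Python) =====
-- from typing import Any, Dict, List, Optional, Tuple, Union
--
-- def format_metrics_by_group(metrics: Dict[str, Any], group_order: List[str], float_precision: int = 3, delimiter: str = " - ") -> Dict[str, Any]:
--     """
--     A flexible helper function that formats metrics based on a predefined group order
--     and alphabetical order within groups. It supports extracting specific keys from
--     a group to be placed elsewhere in the sequence.
--     """
--     if not metrics:
--         return {}
--
--     ordered_dict = {}
--     processed_keys = set()
--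
--     # Pre-identify all explicitly mentioned full keys to exclude them from group processing.
--     explicitly_mentioned_keys = {key for key in group_order if key in metrics}
--
--     # 1. Process metrics according to the defined group/key order.
--     for pattern in group_order:
--         # First, check if the pattern is a full key that should be processed now.
--         if pattern in explicitly_mentioned_keys and pattern not in processed_keys:
--             ordered_dict[pattern] = metrics[pattern]
--             processed_keys.add(pattern)
--         else:
--             # Otherwise, treat the pattern as a group prefix.
--             group_prefix = f"{pattern}/"
--
--             # Find all keys belonging to this group, excluding any that are already processed
--             # or explicitly mentioned elsewhere in the order. Then sort them alphabetically.
--             keys_in_group = sorted([key for key in metrics if key.startswith(group_prefix) and key not in processed_keys and key not in explicitly_mentioned_keys])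
--
--             for key in keys_in_group:
--                 ordered_dict[key] = metrics[key]
--                 processed_keys.add(key)
--
--     # 2. Process all remaining keys that were not matched by any rule.
--     remaining_keys = sorted([key for key in metrics if key not in processed_keys])
--     if remaining_keys:
--         for key in remaining_keys:
--             ordered_dict[key] = metrics[key]
--
--     return ordered_dict
-- ===== SOURCE B (Python) =====
-- def format_metrics_by_group(metrics, group_order, float_precision=3, delimiter=" - "):
--     if not metrics:
--         return {}
--
--     # Classification pass: decide for each group_order occurrence whether it is the
--     # exact-key slot (first occurrence of a pattern that is itself a metrics key)
--     # or a prefix-group slot.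
--     explicit = set(k for k in group_order if k in metrics)
--     slots = []
--     seen = set()
--     for p in group_order:
--         if p in explicit and p not in seen:
--             slots.append((True, p))
--             seen.add(p)
--         else:
--             slots.append((False, p))
--
--     # Assign each non-explicit key to the earliest prefix slot whose pattern + '/'
--     # it starts with; collect the assignments in index-keyed buckets.
--     def target(key):
--         if key in explicit:
--             return None
--         for i, (exact, p) in enumerate(slots):
--             if not exact and key.startswith(p + "/"):
--                 return i
--         return None
--
--     buckets = {}
--     for key in metrics:
--         t = target(key)
--         if t is not None:
--             buckets.setdefault(t, []).append(key)
--
--     # Table-driven emit: walk the slots, then append the sorted leftovers.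
--     out = {}
--     for i, (exact, p) in enumerate(slots):
--         if exact:
--             out[p] = metrics[p]
--         else:
--             for key in sorted(buckets.get(i, [])):
--                 out[key] = metrics[key]
--     for key in sorted(k for k in metrics if k not in out):
--         out[key] = metrics[key]
--     return out
-- ===== Notes on version B (the rewrite author's own statement) =====
-- stated objective: alternative
-- what changed: Replaces A's stateful scan (mutable processed-set consulted inside each per-pattern filter) by a two-phase table-driven plan: one classification pass turns group_order into exact/prefix slots, each key is assigned to the earliest matching prefix slot via a bucket table, and the output is emitted by walking the slot table.
import Mathlib
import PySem

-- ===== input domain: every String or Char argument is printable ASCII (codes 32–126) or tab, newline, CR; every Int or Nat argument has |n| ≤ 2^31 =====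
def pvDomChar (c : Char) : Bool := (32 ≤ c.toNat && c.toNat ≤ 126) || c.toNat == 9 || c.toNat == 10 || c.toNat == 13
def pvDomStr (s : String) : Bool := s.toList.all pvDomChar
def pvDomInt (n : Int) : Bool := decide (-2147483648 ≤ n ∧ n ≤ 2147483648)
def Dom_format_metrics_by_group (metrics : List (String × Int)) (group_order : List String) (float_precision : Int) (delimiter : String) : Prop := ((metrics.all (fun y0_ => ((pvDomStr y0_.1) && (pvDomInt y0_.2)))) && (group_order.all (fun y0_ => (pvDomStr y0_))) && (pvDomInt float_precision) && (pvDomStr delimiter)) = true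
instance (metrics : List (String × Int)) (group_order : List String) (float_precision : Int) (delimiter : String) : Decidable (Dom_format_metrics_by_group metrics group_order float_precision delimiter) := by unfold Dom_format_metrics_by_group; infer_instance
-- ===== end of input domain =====

-- B re-implements format_metrics_by_group as a two-phase table-driven plan (classify group_order into
-- exact/prefix slots, bucket each key under its earliest matching prefix slot, then emit by walking the
-- slot table) instead of A's mutable processed-set scan; same cost, alternative structure, proved equal.
-- ===== PORT A =====
def pvAStep (m : PySem.Dict String Int) (explicit : PySem.Set String)
    (st : PySem.Dict String Int × PySem.Set String) (pattern : String) :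
    PySem.Dict String Int × PySem.Set String :=
  if PySem.Set.contains explicit pattern && !(PySem.Set.contains st.2 pattern) then
    (st.1.insert pattern (m.getD pattern 0), PySem.Set.add st.2 pattern)
  else
    (PySem.List.sorted ((m.keys).filter (fun k =>
        PySem.Str.startswith k (pattern ++ "/") && !(PySem.Set.contains st.2 k)
          && !(PySem.Set.contains explicit k))) (fun x => x) false).foldl
      (fun st2 k => (st2.1.insert k (m.getD k 0), PySem.Set.add st2.2 k)) st

def format_metrics_by_group (metrics : List (String × Int)) (group_order : List String) (float_precision : Int) (delimiter : String) : List (String × Int) :=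
  let m : PySem.Dict String Int := PySem.Dict.ofList metrics
  if m.items.isEmpty then [] else
    let explicit : PySem.Set String := PySem.Set.ofList (group_order.filter (fun k => m.contains k))
    let st := group_order.foldl (pvAStep m explicit) (PySem.Dict.empty, PySem.Set.empty)
    let remaining := PySem.List.sorted ((m.keys).filter (fun k => !(PySem.Set.contains st.2 k))) (fun x => x) false
    if remaining.isEmpty then st.1.items
    else (remaining.foldl (fun (d : PySem.Dict String Int) k => d.insert k (m.getD k 0)) st.1).items

-- ===== PORT B =====
def pvSlotsStep (explicit : PySem.Set String) (st : List (Bool × String) × PySem.Set String) (p : String) : List (Bool × String) × PySem.Set String :=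
  if PySem.Set.contains explicit p && !(PySem.Set.contains st.2 p) then
    (st.1 ++ [(true, p)], PySem.Set.add st.2 p)
  else (st.1 ++ [(false, p)], st.2)

def pvSlotsFrom (explicit : PySem.Set String) (seen : PySem.Set String) (go : List String) : List (Bool × String) :=
  (go.foldl (pvSlotsStep explicit) ([], seen)).1

def pvScan (k : String) (l : List (Bool × String)) (s : Int) : Option Int :=
  (PySem.List.enumerate l s).findSome? (fun p =>
    if !p.2.1 && PySem.Str.startswith k (p.2.2 ++ "/") then some p.1 else none)

def pvTarget (explicit : PySem.Set String) (slots : List (Bool × String)) (k : String) : Option Int :=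
  if PySem.Set.contains explicit k then none else pvScan k slots 0

def pvBuckets (m : PySem.Dict String Int) (explicit : PySem.Set String) (slots : List (Bool × String)) : PySem.Dict Int (List String) :=
  m.keys.foldl (fun d k =>
    match pvTarget explicit slots k with
    | some t => d.modify t [] (fun l => l ++ [k])
    | none => d) PySem.Dict.empty

def pvEmitStep (m : PySem.Dict String Int) (buckets : PySem.Dict Int (List String))
    (d : PySem.Dict String Int) (p : Int × (Bool × String)) : PySem.Dict String Int :=
  if p.2.1 then d.insert p.2.2 (m.getD p.2.2 0)
  else (PySem.List.sorted (buckets.getD p.1 []) (fun x => x) false).foldl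
        (fun d k => d.insert k (m.getD k 0)) d

def format_metrics_by_group_alt (metrics : List (String × Int)) (group_order : List String) (float_precision : Int) (delimiter : String) : List (String × Int) :=
  let m : PySem.Dict String Int := PySem.Dict.ofList metrics
  if m.items.isEmpty then [] else
    let explicit : PySem.Set String := PySem.Set.ofList (group_order.filter (fun k => m.contains k))
    let slots := pvSlotsFrom explicit PySem.Set.empty group_order
    let buckets := pvBuckets m explicit slots
    let out := (PySem.List.enumerate slots 0).foldl (pvEmitStep m buckets) PySem.Dict.empty
    let rest := PySem.List.sorted ((m.keys).filter (fun k => !(out.contains k))) (fun x => x) false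
    (rest.foldl (fun (d : PySem.Dict String Int) k => d.insert k (m.getD k 0)) out).items

-- ===== PRECONDITION & SPEC =====
def Spec_format_metrics_by_group (metrics : List (String × Int)) (group_order : List String) (float_precision : Int) (delimiter : String) (out : List (String × Int)) : Prop := out = format_metrics_by_group_alt metrics group_order float_precision delimiter
instance (metrics : List (String × Int)) (group_order : List String) (float_precision : Int) (delimiter : String) (out : List (String × Int)) : Decidable (Spec_format_metrics_by_group metrics group_order float_precision delimiter out) := by unfold Spec_format_metrics_by_group; infer_instance

-- ===== CLAIM (what is proved, stated in full; the proofs are below) =====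
def Claim_equal_format_metrics_by_group : Prop := ∀ (metrics : List (String × Int)) (group_order : List String) (float_precision : Int) (delimiter : String), Dom_format_metrics_by_group metrics group_order float_precision delimiter → Spec_format_metrics_by_group metrics group_order float_precision delimiter (format_metrics_by_group metrics group_order float_precision delimiter)

-- ===== LEMMAS AND PROOFS =====
lemma pvBoolExt {a b : Bool} (h : a = true ↔ b = true) : a = b := by
  cases a <;> cases b <;> simp_all

lemma pvSlotsFrom_acc (explicit : PySem.Set String) (gs : List String)
    (acc : List (Bool × String)) (seen : PySem.Set String) :
    (gs.foldl (pvSlotsStep explicit) (acc, seen)).1 = acc ++ pvSlotsFrom explicit seen gs := by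
  induction gs generalizing acc seen with
  | nil => simp [pvSlotsFrom]
  | cons p rest ih =>
      simp only [pvSlotsFrom, List.foldl_cons, pvSlotsStep]
      by_cases h : (PySem.Set.contains explicit p && !(PySem.Set.contains seen p)) = true
      · simp only [h, if_pos, ih]
        simp
      · simp only [Bool.not_eq_true] at h
        simp only [h, Bool.false_eq_true, if_neg, ih, Bool.not_eq_true]
        simp

lemma pvSlotsFrom_cons (explicit seen : PySem.Set String) (p : String) (rest : List String) :
    pvSlotsFrom explicit seen (p :: rest) =
      if PySem.Set.contains explicit p && !(PySem.Set.contains seen p) then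
        (true, p) :: pvSlotsFrom explicit (PySem.Set.add seen p) rest
      else (false, p) :: pvSlotsFrom explicit seen rest := by
  simp only [pvSlotsFrom, List.foldl_cons, pvSlotsStep]
  cases hc : (PySem.Set.contains explicit p && !(PySem.Set.contains seen p)) <;>
    simp [pvSlotsFrom_acc]

lemma pvScan_nil (k : String) (s : Int) : pvScan k [] s = none := rfl

lemma pvScan_cons (k : String) (b : Bool) (q : String) (l : List (Bool × String)) (s : Int) :
    pvScan k ((b, q) :: l) s =
      if !b && PySem.Str.startswith k (q ++ "/") then some s else pvScan k l (s + 1) := by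
  simp only [pvScan, PySem.List.enumerate_cons, List.findSome?_cons]
  cases hc : (!b && PySem.Str.startswith k (q ++ "/")) <;> simp [hc]

lemma pvScan_append (k : String) (l1 l2 : List (Bool × String)) (s : Int) :
    pvScan k (l1 ++ l2) s = (pvScan k l1 s).or (pvScan k l2 (s + l1.length)) := by
  induction l1 generalizing s with
  | nil => simp [pvScan_nil]
  | cons hd tl ih =>
      obtain ⟨b, q⟩ := hd
      simp only [List.cons_append, pvScan_cons, ih, List.length_cons]
      split_ifs with hc
      · simp
      · push_cast
        have h2 : s + 1 + (tl.length : Int) = s + ((tl.length : Int) + 1) := by ring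
        rw [h2]

lemma pvScan_bounds (k : String) (l : List (Bool × String)) (s t : Int)
    (h : pvScan k l s = some t) : s ≤ t ∧ t < s + l.length := by
  induction l generalizing s with
  | nil => simp [pvScan_nil] at h
  | cons hd tl ih =>
      obtain ⟨b, q⟩ := hd
      rw [pvScan_cons] at h
      split_ifs at h with hc
      · obtain rfl : s = t := by simpa using h
        simp only [List.length_cons]
        push_cast
        omega
      · have := ih (s + 1) h
        simp only [List.length_cons]
        push_cast
        push_cast at this
        omega

lemma pvBuckets_getD_aux (explicit : PySem.Set String)
    (slots : List (Bool × String)) (L : List String) (d : PySem.Dict Int (List String)) (c : Int) :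
    (L.foldl (fun d k =>
        match pvTarget explicit slots k with
        | some t => d.modify t [] (fun l => l ++ [k])
        | none => d) d).getD c []
      = d.getD c [] ++ L.filter (fun k => pvTarget explicit slots k == some c) := by
  induction L generalizing d with
  | nil => simp
  | cons k rest ih =>
      simp only [List.foldl_cons, List.filter_cons]
      cases h : pvTarget explicit slots k with
      | none => simp [h, ih]
      | some t =>
          simp only [h, ih]
          by_cases htc : t = c
          · subst htc
            simp [PySem.Dict.getD_modify]
          · have : (some t == some c) = false := by
              simp [htc]
            simp [this, PySem.Dict.getD_modify, htc]
            exact fun h' => absurd h'.symm htc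

lemma pvBuckets_getD (m : PySem.Dict String Int) (explicit : PySem.Set String)
    (slots : List (Bool × String)) (c : Int) :
    (pvBuckets m explicit slots).getD c []
      = m.keys.filter (fun k => pvTarget explicit slots k == some c) := by
  rw [pvBuckets, pvBuckets_getD_aux explicit slots]
  simp

lemma pvContains_foldl_insert (L : List String) (m : PySem.Dict String Int)
    (d : PySem.Dict String Int) (x : String) :
    ((L.foldl (fun d k => d.insert k (m.getD k 0)) d).contains x = true) ↔
      (d.contains x = true ∨ x ∈ L) := by
  induction L generalizing d with
  | nil => simp
  | cons k rest ih =>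
      simp only [List.foldl_cons, ih, PySem.Dict.contains_insert, List.mem_cons]
      by_cases hx : x = k
      · subst hx
        simp
      · have : (x == k) = false := by simp [hx]
        simp [this, hx]

lemma pvScan_take_succ_exact (k p : String) (slots : List (Bool × String)) (i : Nat)
    (hlt : i < slots.length) (hgi : slots[i] = (true, p)) :
    pvScan k (slots.take (i + 1)) 0 = pvScan k (slots.take i) 0 := by
  rw [List.take_add_one, List.getElem?_eq_getElem hlt, hgi]
  simp only [Option.toList_some]
  rw [pvScan_append]
  rw [pvScan_cons]
  simp [pvScan_nil]

lemma pvScan_take_succ_prefix (k p : String) (slots : List (Bool × String)) (i : Nat)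
    (hlt : i < slots.length) (hgi : slots[i] = (false, p)) (htl : (slots.take i).length = i) :
    pvScan k (slots.take (i + 1)) 0 =
      (pvScan k (slots.take i) 0).or
        (if PySem.Str.startswith k (p ++ "/") then some (i : Int) else none) := by
  rw [List.take_add_one, List.getElem?_eq_getElem hlt, hgi]
  simp only [Option.toList_some]
  rw [pvScan_append, pvScan_cons]
  simp [pvScan_nil, htl]

lemma pvMain (m : PySem.Dict String Int) (explicit : PySem.Set String)
    (slots : List (Bool × String))
    (hexpl : ∀ q, PySem.Set.contains explicit q = true → q ∈ m.keys)
    (gs : List String) (i : Nat) (seen : PySem.Set String)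
    (st : PySem.Dict String Int × PySem.Set String)
    (hslots : slots.drop i = pvSlotsFrom explicit seen gs)
    (hseen : ∀ q, PySem.Set.contains seen q = true ↔ (true, q) ∈ slots.take i)
    (hexact : ∀ q, (true, q) ∈ slots.take i → PySem.Set.contains explicit q = true)
    (hproc : ∀ k, PySem.Set.contains st.2 k = st.1.contains k)
    (hkeys : ∀ k, st.1.contains k = true ↔ k ∈ m.keys ∧
        ((true, k) ∈ slots.take i ∨
         (PySem.Set.contains explicit k = false ∧ (pvScan k (slots.take i) 0).isSome = true))) :
    (gs.foldl (pvAStep m explicit) st).1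
        = (PySem.List.enumerate (slots.drop i) (i : Int)).foldl
            (pvEmitStep m (pvBuckets m explicit slots)) st.1
    ∧ ∀ k, PySem.Set.contains (gs.foldl (pvAStep m explicit) st).2 k
        = (gs.foldl (pvAStep m explicit) st).1.contains k := by
  induction gs generalizing i seen st with
  | nil =>
      have h0 : slots.drop i = [] := by simpa [pvSlotsFrom] using hslots
      refine ⟨?_, hproc⟩
      simp [h0, PySem.List.enumerate_nil]
  | cons p rest ih =>
      obtain ⟨d0, s0⟩ := st
      simp only at hproc hkeys
      rw [pvSlotsFrom_cons] at hslots
      -- A's branch condition equals the slot-classification condition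
      have hcondeq : (PySem.Set.contains explicit p && !(PySem.Set.contains s0 p))
          = (PySem.Set.contains explicit p && !(PySem.Set.contains seen p)) := by
        by_cases hex : PySem.Set.contains explicit p = true
        · have hs : PySem.Set.contains s0 p = PySem.Set.contains seen p := by
            rw [hproc p]
            apply pvBoolExt
            rw [hkeys p, hseen p]
            have hpm : p ∈ m.keys := hexpl p hex
            have hpe : p ∈ explicit := (PySem.Set.contains_iff explicit p).mp hex
            simp [hex, hpm, hpe]
          rw [hs]
        · simp only [Bool.not_eq_true] at hex
          have hne : p ∉ explicit := fun hm => by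
            rw [(PySem.Set.contains_iff explicit p).mpr hm] at hex
            cases hex
          simp [hne]
      have hlen0 : slots.drop i ≠ [] := by
        rw [hslots]
        split_ifs <;> simp
      have hlt : i < slots.length := by
        by_contra hge
        exact hlen0 (List.drop_eq_nil_of_le (le_of_not_gt hge))
      have hdropc : slots.drop i = slots[i] :: slots.drop (i + 1) := List.drop_eq_getElem_cons hlt
      have htl : (slots.take i).length = i := by
        simp [List.length_take]
        omega
      have htake1 : slots.take (i + 1) = slots.take i ++ [slots[i]] := by
        rw [List.take_add_one, List.getElem?_eq_getElem hlt]
        rfl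
      have hcast : ((i : Int) + 1) = ((i + 1 : Nat) : Int) := by push_cast; ring
      cases hc : (PySem.Set.contains explicit p && !(PySem.Set.contains seen p)) with
      | true =>
          rw [hc] at hslots
          simp only [if_true] at hslots
          have hgi : slots[i] = (true, p) := by
            rw [hdropc] at hslots
            exact (List.cons.injEq _ _ _ _).mp hslots |>.1
          have hdrop1 : slots.drop (i + 1) = pvSlotsFrom explicit (PySem.Set.add seen p) rest := by
            rw [hdropc] at hslots
            exact (List.cons.injEq _ _ _ _).mp hslots |>.2
          have hexp : PySem.Set.contains explicit p = true := by
            rcases Bool.and_eq_true_iff.mp hc with ⟨h1, _⟩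
            exact h1
          have hpm : p ∈ m.keys := hexpl p hexp
          -- A's step
          have hstep : pvAStep m explicit (d0, s0) p
              = (d0.insert p (m.getD p 0), PySem.Set.add s0 p) := by
            rw [pvAStep]
            simp only [hcondeq, hc, if_true]
          -- invariants for i+1
          have hseen' : ∀ q, PySem.Set.contains (PySem.Set.add seen p) q = true
              ↔ (true, q) ∈ slots.take (i + 1) := by
            intro q
            rw [htake1, hgi]
            have hq := hseen q
            simp only [PySem.Set.contains_iff, PySem.Set.mem_add] at hq ⊢
            simp [hq]
          have hexact' : ∀ q, (true, q) ∈ slots.take (i + 1)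
              → PySem.Set.contains explicit q = true := by
            intro q hq
            rw [htake1, hgi] at hq
            rcases List.mem_append.mp hq with h | h
            · exact hexact q h
            · simp at h
              subst h
              exact hexp
          have hproc' : ∀ k, PySem.Set.contains (PySem.Set.add s0 p) k
              = (d0.insert p (m.getD p 0)).contains k := by
            intro k
            apply pvBoolExt
            rw [PySem.Set.contains_iff, PySem.Set.mem_add, ← PySem.Set.contains_iff, hproc k]
            rw [PySem.Dict.contains_insert]
            by_cases hk : k = p
            · simp [hk]
            · have : (k == p) = false := by simp [hk]
              simp [this, hk]
          have hkeys' : ∀ k, (d0.insert p (m.getD p 0)).contains k = true ↔ k ∈ m.keys ∧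
              ((true, k) ∈ slots.take (i + 1) ∨
               (PySem.Set.contains explicit k = false ∧
                 (pvScan k (slots.take (i + 1)) 0).isSome = true)) := by
            intro k
            rw [PySem.Dict.contains_insert, pvScan_take_succ_exact k p slots i hlt hgi,
              htake1, hgi]
            rw [Bool.or_eq_true, beq_iff_eq, hkeys k]
            by_cases hk : k = p
            · subst hk
              simp [hpm, hexp]
            · simp [hk]
          have hih := ih (i + 1) (PySem.Set.add seen p) (d0.insert p (m.getD p 0), PySem.Set.add s0 p)
            hdrop1 hseen' hexact' hproc' hkeys'
          rw [List.foldl_cons, hstep]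
          refine ⟨?_, hih.2⟩
          rw [hdropc, hgi, PySem.List.enumerate_cons, List.foldl_cons]
          have hB : pvEmitStep m (pvBuckets m explicit slots) d0 ((i : Int), (true, p))
              = d0.insert p (m.getD p 0) := by
            simp [pvEmitStep]
          rw [hB, hcast]
          exact hih.1
      | false =>
          rw [hc] at hslots
          simp only [Bool.false_eq_true, if_false] at hslots
          have hgi : slots[i] = (false, p) := by
            rw [hdropc] at hslots
            exact (List.cons.injEq _ _ _ _).mp hslots |>.1
          have hdrop1 : slots.drop (i + 1) = pvSlotsFrom explicit seen rest := by
            rw [hdropc] at hslots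
            exact (List.cons.injEq _ _ _ _).mp hslots |>.2
          -- characterisation of "assigned to slot i"
          have htarget : ∀ k, pvTarget explicit slots k = some (i : Int) ↔
              (PySem.Set.contains explicit k = false ∧ pvScan k (slots.take i) 0 = none ∧
               PySem.Str.startswith k (p ++ "/") = true) := by
            intro k
            rw [pvTarget]
            cases hek : PySem.Set.contains explicit k with
            | true =>
                have hmem : k ∈ explicit := (PySem.Set.contains_iff explicit k).mp hek
                simp [hek, hmem]
            | false =>
                have hnmem : k ∉ explicit := fun hm => by
                  rw [(PySem.Set.contains_iff explicit k).mpr hm] at hek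
                  cases hek
                rw [if_neg (by simp)]
                simp only [hek, eq_self_iff_true, true_and]
                have hsplit : pvScan k slots 0
                    = (pvScan k (slots.take i) 0).or (pvScan k (slots.drop i) (i : Int)) := by
                  conv_lhs => rw [← List.take_append_drop i slots]
                  rw [pvScan_append, htl]
                  norm_num
                rw [hsplit, hdropc, hgi, pvScan_cons]
                simp only [Bool.not_false, Bool.true_and]
                cases hsc : pvScan k (slots.take i) 0 with
                | some t =>
                    rw [Option.some_or]
                    constructor
                    · intro h
                      exfalso
                      have ht : t = (i : Int) := Option.some.inj h
                      have hb := pvScan_bounds k (slots.take i) 0 t hsc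
                      rw [htl] at hb
                      omega
                    · rintro ⟨h1, -⟩
                      cases h1
                | none =>
                    rw [Option.none_or]
                    constructor
                    · intro h
                      by_cases hsw : PySem.Str.startswith k (p ++ "/") = true
                      · exact ⟨rfl, hsw⟩
                      · rw [if_neg hsw] at h
                        have hb := pvScan_bounds k (slots.drop (i + 1)) ((i : Int) + 1) (i : Int) h
                        omega
                    · rintro ⟨-, hsw⟩
                      rw [if_pos hsw]
          -- the two per-slot key lists agree
          have hfilt : m.keys.filter (fun k =>
                PySem.Str.startswith k (p ++ "/") && !(PySem.Set.contains s0 k)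
                  && !(PySem.Set.contains explicit k))
              = m.keys.filter (fun k => pvTarget explicit slots k == some (i : Int)) := by
            apply List.filter_congr
            intro k hk
            apply pvBoolExt
            rw [beq_iff_eq, htarget k]
            simp only [Bool.and_eq_true, Bool.not_eq_true']
            rw [hproc k]
            by_cases hek : PySem.Set.contains explicit k = true
            · have hmem : k ∈ explicit := (PySem.Set.contains_iff explicit k).mp hek
              simp [hek, hmem]
            · simp only [Bool.not_eq_true] at hek
              have hne : k ∉ explicit := fun hm => by
                rw [(PySem.Set.contains_iff explicit k).mpr hm] at hek
                cases hek
              have hnex : ¬ ((true, k) ∈ slots.take i) := fun hmem => by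
                rw [hexact k hmem] at hek
                cases hek
              have hct : d0.contains k = true ↔ (pvScan k (slots.take i) 0).isSome = true := by
                rw [hkeys k]
                simp [hk, hnex, hne]
              constructor
              · rintro ⟨⟨hsw, hd0⟩, -⟩
                refine ⟨hek, ?_, hsw⟩ 
                rw [← Option.not_isSome_iff_eq_none]
                intro hsome
                rw [← hct] at hsome
                rw [hsome] at hd0
                cases hd0
              · rintro ⟨-, hnone, hsw⟩
                refine ⟨⟨hsw, ?_⟩, hek⟩
                cases hd : d0.contains k
                · rfl
                · exfalso
                  have := hct.mp hd
                  rw [hnone] at this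
                  cases this
          -- A's step in the prefix case
          have hstep : pvAStep m explicit (d0, s0) p
              = ((PySem.List.sorted (m.keys.filter (fun k =>
                    pvTarget explicit slots k == some (i : Int))) (fun x => x) false).foldl
                  (fun d k => d.insert k (m.getD k 0)) d0,
                 (PySem.List.sorted (m.keys.filter (fun k =>
                    pvTarget explicit slots k == some (i : Int))) (fun x => x) false).foldl
                  (fun s k => PySem.Set.add s k) s0) := by
            rw [pvAStep]
            simp only [hcondeq, hc, Bool.false_eq_true, if_neg, if_false]
            rw [hfilt]
            rw [PySem.List.foldl_prod_mk (f := fun (d : PySem.Dict String Int) k => d.insert k (m.getD k 0))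
              (g := fun (s : PySem.Set String) k => PySem.Set.add s k)]
          have hmemkig : ∀ k, k ∈ (PySem.List.sorted (m.keys.filter (fun k =>
                    pvTarget explicit slots k == some (i : Int))) (fun x => x) false) ↔
              (k ∈ m.keys ∧ pvTarget explicit slots k = some (i : Int)) := by
            intro k
            rw [PySem.List.mem_sorted, List.mem_filter]
            simp
          have hseen' : ∀ q, PySem.Set.contains seen q = true
              ↔ (true, q) ∈ slots.take (i + 1) := by
            intro q
            rw [htake1, hgi]
            have hq := hseen q
            rw [PySem.Set.contains_iff] at hq
            simp [hq]
          have hexact' : ∀ q, (true, q) ∈ slots.take (i + 1)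
              → PySem.Set.contains explicit q = true := by
            intro q hq
            rw [htake1, hgi] at hq
            rcases List.mem_append.mp hq with h | h
            · exact hexact q h
            · simp at h
          have hproc' : ∀ k, PySem.Set.contains ((PySem.List.sorted (m.keys.filter (fun k =>
                    pvTarget explicit slots k == some (i : Int))) (fun x => x) false).foldl (fun s k => PySem.Set.add s k) s0) k
              = ((PySem.List.sorted (m.keys.filter (fun k =>
                    pvTarget explicit slots k == some (i : Int))) (fun x => x) false).foldl (fun d k => d.insert k (m.getD k 0)) d0).contains k := by
            intro k
            apply pvBoolExt
            rw [PySem.Set.contains_iff]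
            rw [PySem.Set.mem_foldl_add (f := fun (b : String) => b)]
            rw [pvContains_foldl_insert]
            have h1 : k ∈ s0 ↔ d0.contains k = true := by
              rw [← PySem.Set.contains_iff s0 k, hproc k]
            simp [h1]
          have horsome : ∀ (x y : Option Int), (x.or y).isSome = (x.isSome || y.isSome) := by
            intro x y
            cases x <;> simp
          have hkeys' : ∀ k, ((PySem.List.sorted (m.keys.filter (fun k =>
                    pvTarget explicit slots k == some (i : Int))) (fun x => x) false).foldl (fun d k => d.insert k (m.getD k 0)) d0).contains k = true
              ↔ k ∈ m.keys ∧
              ((true, k) ∈ slots.take (i + 1) ∨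
               (PySem.Set.contains explicit k = false ∧
                 (pvScan k (slots.take (i + 1)) 0).isSome = true)) := by
            intro k
            rw [pvContains_foldl_insert, hkeys k, hmemkig k,
              pvScan_take_succ_prefix k p slots i hlt hgi htl, htake1, hgi, htarget k, horsome]
            by_cases hek : PySem.Set.contains explicit k = true
            · have hmem : k ∈ explicit := (PySem.Set.contains_iff explicit k).mp hek
              simp [hek, hmem]
            · simp only [Bool.not_eq_true] at hek
              have hmemtk : ¬ ((true, k) ∈ slots.take i) := fun hmem => by
                rw [hexact k hmem] at hek
                cases hek
              have hifsome : (if PySem.Str.startswith k (p ++ "/") = true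
                  then some (i : Int) else none).isSome = PySem.Str.startswith k (p ++ "/") := by
                by_cases hsw : PySem.Str.startswith k (p ++ "/") = true
                · rw [if_pos hsw, hsw]
                  rfl
                · rw [if_neg hsw]
                  simp only [Bool.not_eq_true] at hsw
                  rw [hsw]
                  rfl
              rw [hifsome]
              cases hsc : pvScan k (slots.take i) 0 with
              | some t => simp [hek, hmemtk, hsc]
              | none => simp [hek, hmemtk, hsc]
          have hih := ih (i + 1) seen
            ((PySem.List.sorted (m.keys.filter (fun k =>
                    pvTarget explicit slots k == some (i : Int))) (fun x => x) false).foldl (fun d k => d.insert k (m.getD k 0)) d0,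
             (PySem.List.sorted (m.keys.filter (fun k =>
                    pvTarget explicit slots k == some (i : Int))) (fun x => x) false).foldl (fun s k => PySem.Set.add s k) s0)
            hdrop1 hseen' hexact' hproc' hkeys'
          rw [List.foldl_cons, hstep]
          refine ⟨?_, hih.2⟩
          rw [hdropc, hgi, PySem.List.enumerate_cons, List.foldl_cons]
          have hB : pvEmitStep m (pvBuckets m explicit slots) d0 ((i : Int), (false, p))
              = (PySem.List.sorted (m.keys.filter (fun k =>
                    pvTarget explicit slots k == some (i : Int))) (fun x => x) false).foldl (fun d k => d.insert k (m.getD k 0)) d0 := by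
            simp only [pvEmitStep]
            rw [pvBuckets_getD]
            simp
          rw [hB, hcast]
          exact hih.1


-- ===== VERDICT (by name: the statement is the Claim_ definition above) =====
theorem format_metrics_by_group_spec : Claim_equal_format_metrics_by_group := by
  unfold Claim_equal_format_metrics_by_group
  intro metrics group_order float_precision delimiter _
  unfold Spec_format_metrics_by_group
  rw [format_metrics_by_group, format_metrics_by_group_alt]
  dsimp only
  by_cases hemp : (PySem.Dict.ofList metrics).items.isEmpty = true
  · rw [if_pos hemp, if_pos hemp]
  · rw [if_neg hemp, if_neg hemp]
    set m := PySem.Dict.ofList metrics with hm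
    set explicit := PySem.Set.ofList (group_order.filter (fun k => m.contains k)) with hexP
    set slots := pvSlotsFrom explicit PySem.Set.empty group_order with hslotsdef
    set st := group_order.foldl (pvAStep m explicit) (PySem.Dict.empty, PySem.Set.empty) with hst
    set out := (PySem.List.enumerate slots 0).foldl (pvEmitStep m (pvBuckets m explicit slots)) PySem.Dict.empty with hout
    have hexpl : ∀ q, PySem.Set.contains explicit q = true → q ∈ m.keys := by
      intro q hq
      have h1 := (PySem.Set.contains_iff explicit q).mp hq
      rw [hexP, PySem.Set.mem_ofList] at h1
      rcases List.mem_filter.mp h1 with ⟨-, hc⟩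
      exact (PySem.Dict.contains_iff_mem_keys m q).mp hc
    have key := pvMain m explicit slots hexpl group_order 0 PySem.Set.empty
      (PySem.Dict.empty, PySem.Set.empty)
      (by rw [List.drop_zero])
      (by intro q; simp [PySem.Set.empty])
      (by intro q h; simp at h)
      (by intro k; simp [PySem.Set.empty])
      (by intro k; simp [pvScan_nil])
    have hout' : st.1 = out := by
      rw [hout]
      have := key.1
      simpa using this
    have hfe : m.keys.filter (fun k => !(PySem.Set.contains st.2 k))
        = m.keys.filter (fun k => !(out.contains k)) := by
      apply List.filter_congr
      intro k _
      rw [key.2 k, hout']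
    rw [hfe, hout']
    by_cases hre : (PySem.List.sorted (m.keys.filter (fun k => !(out.contains k)))
        (fun x => x) false).isEmpty = true
    · rw [if_pos hre]
      have hnil := List.isEmpty_iff.mp hre
      rw [hnil, List.foldl_nil]
    · rw [if_neg hre]
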